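-- pv_equiv track=rewrite | github.com/paiml/depyler | examples/hard_sec_xor_cipher.py | score_english
-- ===== SOURCE A (Python) =====
-- from typing import List, Tuple
--
-- def score_english(data: List[int]) -> int:
--     score: int = 0
--     common: List[int] = [32, 101, 116, 97, 111, 105, 110, 115]
--     for b in data:
--         for c in common:
--             if b == c:
--                 score = score + 1
--     return score
-- ===== SOURCE B (Python) =====
-- from bisect import bisect_left, bisect_right
--
-- def score_english(data):
--     common = [32, 101, 116, 97, 111, 105, 110, 115]
--     s = sorted(data)
--     total = 0
--     for c in common:
--         total += bisect_right(s, c) - bisect_left(s, c)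
--     return total
-- ===== Notes on version B (the rewrite author's own statement) =====
-- stated objective: alternative
-- what changed: B sorts the data once and then counts each of the 8 common codes by binary search (bisect_right - bisect_left on the sorted list), replacing A's nested per-byte scan of the fixed common list with a sort-then-binary-search algorithm.
import Mathlib
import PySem

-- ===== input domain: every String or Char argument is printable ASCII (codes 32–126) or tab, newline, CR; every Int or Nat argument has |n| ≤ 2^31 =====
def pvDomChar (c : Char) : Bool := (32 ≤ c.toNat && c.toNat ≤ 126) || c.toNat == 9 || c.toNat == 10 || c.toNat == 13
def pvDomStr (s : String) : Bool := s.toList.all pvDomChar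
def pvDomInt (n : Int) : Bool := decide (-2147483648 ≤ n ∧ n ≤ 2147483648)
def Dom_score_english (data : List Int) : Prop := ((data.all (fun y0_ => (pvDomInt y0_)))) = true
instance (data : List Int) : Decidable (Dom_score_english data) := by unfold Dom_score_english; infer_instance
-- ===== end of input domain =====

-- B sorts the data once and counts each common code by binary search (bisect) instead of
-- A's nested per-byte scan of the fixed list: a different algorithm, similar cost (alternative).

-- ===== PORT A =====
def score_english (data : List Int) : Int :=
  let common : List Int := [32, 101, 116, 97, 111, 105, 110, 115]
  data.foldl (fun score b =>
    common.foldl (fun score c => if b == c then score + 1 else score) score) 0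

-- ===== PORT B =====
def score_english_alt (data : List Int) : Int :=
  let common : List Int := [32, 101, 116, 97, 111, 105, 110, 115]
  let s := PySem.List.sorted data (fun x => x) false
  common.foldl (fun total c =>
    total + ((PySem.List.bisectRight s c : Int) - (PySem.List.bisectLeft s c : Int))) 0

-- ===== PRECONDITION & SPEC =====
def Spec_score_english (data : List Int) (out : Int) : Prop := out = score_english_alt data
instance (data : List Int) (out : Int) : Decidable (Spec_score_english data out) := by unfold Spec_score_english; infer_instance

-- ===== CLAIM (what is proved, stated in full; the proofs are below) =====
def Claim_equal_score_english : Prop := ∀ (data : List Int), Dom_score_english data → Spec_score_english data (score_english data)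

-- ===== LEMMAS AND PROOFS =====

def pvInd (c b : Int) : Int := if b = c then 1 else 0

lemma pvInd_step (b c s : Int) :
    (if b == c then s + 1 else s) = s + pvInd c b := by
  simp only [pvInd, beq_iff_eq]; split_ifs <;> omega

lemma pvInd_count (c b : Int) (t : List Int) :
    ((List.count c (b :: t) : Int)) = (List.count c t : Int) + pvInd c b := by
  simp only [List.count_cons, pvInd, beq_iff_eq]
  split_ifs <;> omega

lemma score_english_foldl_eq (data : List Int) : ∀ s : Int,
    data.foldl (fun score b =>
      ([32, 101, 116, 97, 111, 105, 110, 115] : List Int).foldl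
        (fun score c => if b == c then score + 1 else score) score) s
    = s + data.count 32 + data.count 101 + data.count 116 + data.count 97
        + data.count 111 + data.count 105 + data.count 110 + data.count 115 := by
  induction data with
  | nil => intro s; simp
  | cons b t ih =>
    intro s
    rw [List.foldl_cons, ih]
    simp only [List.foldl_cons, List.foldl_nil, pvInd_step, pvInd_count]
    ring

-- a predicate that holds exactly on the first L positions counts to L
lemma countP_prefix (s : List Int) (p : Int → Bool) (L : Nat) (hL : L ≤ s.length)
    (h1 : ∀ j (h : j < s.length), j < L → p s[j])
    (h2 : ∀ j (h : j < s.length), L ≤ j → ¬ p s[j]) :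
    s.countP p = L := by
  have hsplit : s = s.take L ++ s.drop L := (List.take_append_drop L s).symm
  rw [hsplit, List.countP_append]
  have htake : (s.take L).countP p = L := by
    rw [List.countP_eq_length.2, List.length_take, Nat.min_eq_left hL]
    intro x hx
    rw [List.mem_iff_getElem] at hx
    obtain ⟨i, hi, rfl⟩ := hx
    have hiL : i < L := lt_of_lt_of_le hi (by simp [List.length_take])
    have hilen : i < s.length := lt_of_lt_of_le hiL hL
    have := h1 i hilen hiL
    simpa [List.getElem_take] using this
  have hdrop : (s.drop L).countP p = 0 := by
    rw [List.countP_eq_zero]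
    intro x hx
    rw [List.mem_iff_getElem] at hx
    obtain ⟨i, hi, rfl⟩ := hx
    have hilen : L + i < s.length := by
      have := hi; simp [List.length_drop] at this; omega
    have := h2 (L + i) hilen (Nat.le_add_right _ _)
    simpa [List.getElem_drop] using this
  omega

lemma countP_le_split (c : Int) (s : List Int) :
    s.countP (fun x => decide (x ≤ c)) = s.countP (fun x => decide (x < c)) + s.count c := by
  induction s with
  | nil => simp
  | cons a t ih =>
    simp only [List.countP_cons, List.count_cons, ih]
    rcases lt_trichotomy a c with h | h | h <;> simp [h, le_of_lt, not_lt_of_gt, ne_of_gt, ne_of_lt] <;> omega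

lemma bisect_diff_eq_count (s : List Int) (c : Int)
    (hs : s.Pairwise (fun a b => a ≤ b)) :
    (PySem.List.bisectRight s c : Int) - (PySem.List.bisectLeft s c : Int) = s.count c := by
  obtain ⟨hR_le, hR1, hR2⟩ := PySem.List.bisectRight_spec s c hs
  obtain ⟨hL_le, hL1, hL2⟩ := PySem.List.bisectLeft_spec s c hs
  have hle : s.countP (fun x => decide (x ≤ c)) = PySem.List.bisectRight s c := by
    apply countP_prefix s _ _ hR_le
    · intro j h hj; simpa using hR1 j h hj
    · intro j h hj; simpa using not_le_of_gt (hR2 j h hj)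
  have hlt : s.countP (fun x => decide (x < c)) = PySem.List.bisectLeft s c := by
    apply countP_prefix s _ _ hL_le
    · intro j h hj; simpa using hL1 j h hj
    · intro j h hj; simpa using not_lt_of_ge (hL2 j h hj)
  have := countP_le_split c s
  omega

lemma bisect_diff_eq_count_data (data : List Int) (c : Int) :
    (PySem.List.bisectRight (PySem.List.sorted data (fun x => x) false) c : Int)
      - (PySem.List.bisectLeft (PySem.List.sorted data (fun x => x) false) c : Int)
    = data.count c := by
  rw [bisect_diff_eq_count _ c (by simpa using PySem.List.sorted_pairwise data (fun x => x))]
  exact congrArg _ ((PySem.List.sorted_perm data (fun x => x) false).count_eq c)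

-- ===== VERDICT (by name: the statement is the Claim_ definition above) =====
theorem score_english_spec : Claim_equal_score_english := by
  intro data _
  unfold Spec_score_english
  simp only [score_english, score_english_alt]
  rw [score_english_foldl_eq]
  simp only [List.foldl_cons, List.foldl_nil, bisect_diff_eq_count_data]
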